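-- pv_equiv track=rewrite | github.com/alexandrepv/mlnb | h_project/voice_processing/audio_segmentation/audio_segmenter.py | get_valid_intervals
-- ===== SOURCE A (Python) =====
-- def get_valid_intervals(input_mask, min_size=3):
--
--     """
--     Finds intervals in the inputmask of continuous True
--
--     :param input_mask: boolean mask of valid intervals
--     :param min_size: minimum size of groups of True
--     :return:
--     """
--
--     num_windows = len(input_mask)
--     new_interval = True
--     current_interval_start = 0
--     intervals = []
--
--     # Convert all continuous True windows into an interval
--     for i in range(num_windows):
--
--         # Start a new interval
--         if new_interval and input_mask[i]:
--             new_interval = False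
--             current_interval_start = i
--
--         # Append to current interval
--         if not new_interval and not input_mask[i]:
--             new_interval = True
--             intervals.append([current_interval_start, i])
--
--     # Only return intervals greater or equal to the valid minimum size
--     valid_intervals = [itv for itv in intervals if itv[1]-itv[0] >= min_size]
--
--     return valid_intervals
-- ===== SOURCE B (Python) =====
-- def get_valid_intervals(input_mask, min_size=3):
--     prev = [False] + list(input_mask[:-1])
--     starts = [i for i, (p, v) in enumerate(zip(prev, input_mask)) if v and not p]
--     ends = [i for i, (p, v) in enumerate(zip(prev, input_mask)) if p and not v]
--     return [[s, e] for s, e in zip(starts, ends) if e - s >= min_size]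
-- ===== Notes on version B (the rewrite author's own statement) =====
-- stated objective: alternative
-- what changed: Replaces A's single stateful sweep (new_interval flag + pending start) with two stateless edge-index passes (rising and falling edges via a shifted copy of the mask) paired by zip, whose truncation reproduces A's drop of a trailing True run.
import Mathlib
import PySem

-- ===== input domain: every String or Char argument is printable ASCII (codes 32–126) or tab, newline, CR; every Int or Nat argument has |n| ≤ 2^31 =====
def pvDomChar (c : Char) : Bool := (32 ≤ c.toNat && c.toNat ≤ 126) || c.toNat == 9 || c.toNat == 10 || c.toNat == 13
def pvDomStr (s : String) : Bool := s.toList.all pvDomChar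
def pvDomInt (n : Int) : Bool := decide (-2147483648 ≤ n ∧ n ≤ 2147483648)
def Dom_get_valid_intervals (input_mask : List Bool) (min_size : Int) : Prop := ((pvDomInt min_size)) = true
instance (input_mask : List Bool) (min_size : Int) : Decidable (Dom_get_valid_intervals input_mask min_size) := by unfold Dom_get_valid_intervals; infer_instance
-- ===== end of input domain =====

-- B replaces A's single stateful sweep with two stateless edge-index passes paired by zip (alternative decomposition, same cost).

-- ===== PORT A =====
-- literal port of A: a single sweep over indices with state (new_interval, current_interval_start, intervals),
-- then a filter keeping intervals of size ≥ min_size.  itv[1]/itv[0] are in range (every itv has length 2), so getD is exact.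
-- one iteration of A's loop body over state (new_interval, current_interval_start, intervals) at (i, input_mask[i])
def stepA (st : Bool × Int × List (List Int)) (iv : Int × Bool) : Bool × Int × List (List Int) :=
  -- if new_interval and input_mask[i]: new_interval = False; current_interval_start = i
  let s1 : Bool × Int := if st.1 && iv.2 then (false, iv.1) else (st.1, st.2.1)
  -- if not new_interval and not input_mask[i]: new_interval = True; intervals.append([start, i])
  if !s1.1 && !iv.2 then (true, s1.2, st.2.2 ++ [[s1.2, iv.1]]) else (s1.1, s1.2, st.2.2)

def get_valid_intervals (input_mask : List Bool) (min_size : Int) : List (List Int) :=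
  let st := (PySem.List.enumerate input_mask 0).foldl stepA (true, 0, [])
  st.2.2.filter (fun itv => decide (itv.getD 1 0 - itv.getD 0 0 ≥ min_size))

-- ===== PORT B =====
-- literal port of B: prev = [False] + input_mask[:-1]; rising/falling edge index lists; zip-pair; size filter.
def get_valid_intervals_alt (input_mask : List Bool) (min_size : Int) : List (List Int) :=
  let prev := false :: PySem.List.slice input_mask none (some (-1))
  let pv := PySem.List.enumerate (prev.zip input_mask) 0
  let starts := (pv.filter (fun x => x.2.2 && !x.2.1)).map (·.1)
  let ends := (pv.filter (fun x => x.2.1 && !x.2.2)).map (·.1)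
  ((starts.zip ends).filter (fun se => decide (se.2 - se.1 ≥ min_size))).map (fun se => [se.1, se.2])

-- ===== PRECONDITION & SPEC =====
def Spec_get_valid_intervals (input_mask : List Bool) (min_size : Int) (out : List (List Int)) : Prop := out = get_valid_intervals_alt input_mask min_size
instance (input_mask : List Bool) (min_size : Int) (out : List (List Int)) : Decidable (Spec_get_valid_intervals input_mask min_size out) := by unfold Spec_get_valid_intervals; infer_instance

-- ===== CLAIM (what is proved, stated in full; the proofs are below) =====
def Claim_equal_get_valid_intervals : Prop := ∀ (input_mask : List Bool) (min_size : Int), Dom_get_valid_intervals input_mask min_size → Spec_get_valid_intervals input_mask min_size (get_valid_intervals input_mask min_size)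

-- ===== LEMMAS AND PROOFS =====

-- rising-edge indices of a mask, given the previous sample p and the index i of the head
def goS (p : Bool) (i : Int) : List Bool → List Int
  | [] => []
  | b :: r => if b && !p then i :: goS b (i+1) r else goS b (i+1) r

-- falling-edge indices
def goE (p : Bool) (i : Int) : List Bool → List Int
  | [] => []
  | b :: r => if p && !b then i :: goE b (i+1) r else goE b (i+1) r

-- A's sweep as a structural recursion; p = "inside an interval" (= not new_interval), s = pending start
def goA (p : Bool) (s : Int) (i : Int) : List Bool → List (Int × Int)
  | [] => []
  | b :: r =>
    if p then (if b then goA true s (i+1) r else (s, i) :: goA false s (i+1) r)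
    else (if b then goA true i (i+1) r else goA false s (i+1) r)

-- zip of edge lists equals the sweep's pair list
lemma zip_edges (r : List Bool) :
    (∀ (i s : Int), (goS false i r).zip (goE false i r) = goA false s i r) ∧
    (∀ (i s : Int), (s :: goS true i r).zip (goE true i r) = goA true s i r) := by
  induction r with
  | nil => simp [goS, goE, goA]
  | cons b r ih =>
    cases b <;> constructor <;> intro i s <;> simp [goS, goE, goA] <;>
      first
        | exact ih.1 (i+1) s
        | exact ih.2 (i+1) i
        | exact ih.2 (i+1) s

lemma stepA_tt (s a : Int) (acc : List (List Int)) : stepA (true, s, acc) (a, true) = (false, a, acc) := by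
  simp [stepA]
lemma stepA_tf (s a : Int) (acc : List (List Int)) : stepA (true, s, acc) (a, false) = (true, s, acc) := by
  simp [stepA]
lemma stepA_ft (s a : Int) (acc : List (List Int)) : stepA (false, s, acc) (a, true) = (false, s, acc) := by
  simp [stepA]
lemma stepA_ff (s a : Int) (acc : List (List Int)) :
    stepA (false, s, acc) (a, false) = (true, s, acc ++ [[s, a]]) := by
  simp [stepA]

-- A's foldl accumulates exactly goA's pairs (as two-element lists)
lemma foldlA (r : List Bool) :
    ∀ (i : Int) (ni : Bool) (start : Int) (acc : List (List Int)),
    ((PySem.List.enumerate r i).foldl stepA (ni, start, acc)).2.2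
    = acc ++ (goA (!ni) start i r).map (fun p => [p.1, p.2]) := by
  induction r with
  | nil => intro i ni start acc; simp [PySem.List.enumerate_nil, goA]
  | cons b r ih =>
    intro i ni start acc
    rw [PySem.List.enumerate_cons, List.foldl_cons]
    cases ni <;> cases b
    · rw [stepA_ff, ih, goA]; simp
    · rw [stepA_ft, ih]; simp [goA]
    · rw [stepA_tf, ih]; simp [goA]
    · rw [stepA_tt, ih]; simp [goA]

-- zip truncates the longer list, so prepending then dropping the last element changes nothing
lemma zip_dropLast' {α : Type} (l : List α) : ∀ (p : α), ((p :: l).dropLast).zip l = (p :: l).zip l := by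
  induction l with
  | nil => intro p; simp
  | cons b r ih =>
    intro p
    rw [List.dropLast_cons₂, List.zip_cons_cons, List.zip_cons_cons]
    congr 1
    exact ih b

lemma zip_dropLast {α : Type} (l : List α) (p : α) : (p :: l.dropLast).zip l = (p :: l).zip l := by
  cases l with
  | nil => simp
  | cons b r => rw [← List.dropLast_cons₂, zip_dropLast']

-- B's rising-edge comprehension computes goS
lemma startsB (mask : List Bool) : ∀ (p : Bool) (i : Int),
    (((PySem.List.enumerate ((p :: mask).zip mask) i)).filter (fun x => x.2.2 && !x.2.1)).map (·.1)
      = goS p i mask := by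
  induction mask with
  | nil => intro p i; simp [PySem.List.enumerate_nil, goS]
  | cons b r ih =>
    intro p i
    rw [List.zip_cons_cons, PySem.List.enumerate_cons]
    cases p <;> cases b <;> simp [goS, ih]

-- B's falling-edge comprehension computes goE
lemma endsB (mask : List Bool) : ∀ (p : Bool) (i : Int),
    (((PySem.List.enumerate ((p :: mask).zip mask) i)).filter (fun x => x.2.1 && !x.2.2)).map (·.1)
      = goE p i mask := by
  induction mask with
  | nil => intro p i; simp [PySem.List.enumerate_nil, goE]
  | cons b r ih =>
    intro p i
    rw [List.zip_cons_cons, PySem.List.enumerate_cons]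
    cases p <;> cases b <;> simp [goE, ih]

-- ===== VERDICT (by name: the statement is the Claim_ definition above) =====
theorem get_valid_intervals_spec : Claim_equal_get_valid_intervals := by
  intro mask min_size _
  show get_valid_intervals mask min_size = get_valid_intervals_alt mask min_size
  simp only [get_valid_intervals, get_valid_intervals_alt, PySem.List.slice_to_neg_one]
  rw [zip_dropLast, startsB, endsB, foldlA mask 0 true 0 [], (zip_edges mask).1 0 0]
  simp [List.filter_map, Function.comp_def]
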